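-- pv_equiv track=rewrite | github.com/salauddinaliahmed/EBC_7100-Assignment_1 | Final_project/functions.py | stopwords_gen
-- ===== SOURCE A (Python) =====
-- from collections import Counter
-- from collections import Counter
--
-- def stopwords_gen(dictionary):
--     ingredients_percuisine = []
--     ingredients_percuisine = dictionary.values()
--     list_of_ingred = []
--     for each_ingred in ingredients_percuisine:
--         list_of_ingred.append(each_ingred)
--
--     all_ingred = ",".join(inner for i in list_of_ingred for inner in i)
--     each_ingred = all_ingred.split(',')
--
--     most_common_ingred = Counter(list(each_ingred)).most_common(10)
--     stp_wrds = []
--     for each_tuple in most_common_ingred: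
--         stp_wrds.append(each_tuple[0])
--     return stp_wrds, most_common_ingred
-- ===== SOURCE B (Python) =====
-- def _first_ge(ordered, tok):
--     # index of the first element >= tok in the sorted list `ordered`
--     lo, hi = 0, len(ordered)
--     while lo < hi:
--         mid = (lo + hi) // 2
--         if ordered[mid] < tok:
--             lo = mid + 1
--         else:
--             hi = mid
--     return lo
--
--
-- def _first_gt(ordered, tok):
--     # index of the first element > tok in the sorted list `ordered`
--     lo, hi = 0, len(ordered)
--     while lo < hi:
--         mid = (lo + hi) // 2
--         if ordered[mid] <= tok:
--             lo = mid + 1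
--         else:
--             hi = mid
--     return lo
--
--
-- def stopwords_gen(dictionary):
--     tokens = []
--     for ingred_list in dictionary.values():
--         for item in ingred_list:
--             tokens.extend(item.split(','))
--     # counting by sorting: each token's frequency is the width of its block
--     # in the sorted token list, found by two binary searches
--     ordered = sorted(tokens)
--     items = [(tok, _first_gt(ordered, tok) - _first_ge(ordered, tok))
--              for tok in dict.fromkeys(tokens)]
--     most_common_ingred = sorted(items, key=lambda kv: kv[1], reverse=True)[:10]
--     stp_wrds = [tok for tok, _ in most_common_ingred]
--     return stp_wrds, most_common_ingred
-- ===== Notes on version B (the rewrite author's own statement) =====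
-- stated objective: alternative
-- what changed: B drops A's join-everything-then-resplit roundtrip and its Counter/most_common top-k: it counts by sorting — the flat token list is sorted once and each distinct token's frequency is read off as the width of its block, located with two hand-written binary searches — and the ranking is one stable descending sort sliced to 10.
-- intended difference: When every value list of the dict is empty (including the empty dict), A's ','.join over nothing yields '' which splits to [''], so A returns ([''], [('', 1)]) — a phantom empty ingredient; B returns ([], []), the intended 'no ingredients' answer. — e.g. on stopwords_gen([]): A returns ([""], [("", 1)]), B returns ([], [])
import Mathlib
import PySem

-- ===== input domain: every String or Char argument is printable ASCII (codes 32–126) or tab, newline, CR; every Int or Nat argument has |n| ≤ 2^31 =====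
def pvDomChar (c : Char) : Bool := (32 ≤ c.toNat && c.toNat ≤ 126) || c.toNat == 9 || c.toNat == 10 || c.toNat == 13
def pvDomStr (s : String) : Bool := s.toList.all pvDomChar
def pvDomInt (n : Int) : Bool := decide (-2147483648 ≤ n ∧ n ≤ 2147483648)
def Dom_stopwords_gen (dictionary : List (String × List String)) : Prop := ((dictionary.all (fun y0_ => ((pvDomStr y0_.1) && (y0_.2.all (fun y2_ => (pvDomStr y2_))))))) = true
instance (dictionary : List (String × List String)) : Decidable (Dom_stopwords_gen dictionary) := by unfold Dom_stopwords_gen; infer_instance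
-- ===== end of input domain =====

-- B counts by sorting instead of hashing: it sorts the flat token list once and reads each distinct
-- token's frequency off the sorted list with two binary searches, then ranks with one stable
-- descending sort (objective: alternative — no Counter, no heap top-k).

-- ===== PORT A =====
def stopwords_gen (dictionary : List (String × List String)) : List String × (List (String × Int)) :=
  let ingredients_percuisine := (PySem.Dict.ofList dictionary).values
  let list_of_ingred := ingredients_percuisine.foldl (fun acc e => acc ++ [e]) []
  let all_ingred := PySem.Str.join "," (list_of_ingred.flatMap (fun i => i))
  let each_ingred := (PySem.Str.split? all_ingred ",").getD []
  -- Counter(...).most_common(10): CPython documents it as sorted(items, key=count, reverse=True)[:10]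
  -- (stable, first-seen order among equal counts); ported as that sorted-take.
  let most_common_ingred := (PySem.List.sorted (PySem.Dict.counter each_ingred).items (fun kv => kv.2) true).take 10
  let stp_wrds := most_common_ingred.foldl (fun acc t => acc ++ [t.1]) []
  (stp_wrds, most_common_ingred)

-- ===== PORT B =====
-- Source B's _first_ge while-loop: first index with ordered[idx] >= tok (fuel = initial hi - lo;
-- the wrapper passes ordered.length, which bounds every hi - lo the loop reaches).
def pvBsearchGE (ordered : List String) (tok : String) : Nat → Nat → Nat → Nat
  | 0, lo, _ => lo
  | fuel + 1, lo, hi =>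
    if lo < hi then
      -- ordered[(lo+hi)//2]: (lo+hi)//2 < hi ≤ len ordered at every call, so never an IndexError
      match PySem.List.pyGet? ordered (((lo + hi) / 2 : Nat) : Int) with
      | some y => if y < tok then pvBsearchGE ordered tok fuel ((lo + hi) / 2 + 1) hi
                  else pvBsearchGE ordered tok fuel lo ((lo + hi) / 2)
      | none => lo
    else lo

-- Source B's _first_gt while-loop: first index with ordered[idx] > tok
def pvBsearchGT (ordered : List String) (tok : String) : Nat → Nat → Nat → Nat
  | 0, lo, _ => lo
  | fuel + 1, lo, hi =>
    if lo < hi then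
      match PySem.List.pyGet? ordered (((lo + hi) / 2 : Nat) : Int) with
      | some y => if y ≤ tok then pvBsearchGT ordered tok fuel ((lo + hi) / 2 + 1) hi
                  else pvBsearchGT ordered tok fuel lo ((lo + hi) / 2)
      | none => lo
    else lo

def pvFirstGE (ordered : List String) (tok : String) : Nat :=
  pvBsearchGE ordered tok ordered.length 0 ordered.length

def pvFirstGT (ordered : List String) (tok : String) : Nat :=
  pvBsearchGT ordered tok ordered.length 0 ordered.length

def stopwords_gen_alt (dictionary : List (String × List String)) : List String × (List (String × Int)) :=
  let tokens := (PySem.Dict.ofList dictionary).values.foldl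
    (fun tk ingred_list => ingred_list.foldl
      (fun tk item => tk ++ ((PySem.Str.split? item ",").getD [])) tk) []
  let ordered := PySem.List.sorted tokens (fun x => x) false
  let items := (PySem.List.dedup tokens).map
    (fun tok => (tok, ((pvFirstGT ordered tok : Int) - (pvFirstGE ordered tok : Int))))
  let most_common_ingred :=
    PySem.List.slice (PySem.List.sorted items (fun kv => kv.2) true) none (some 10)
  let stp_wrds := most_common_ingred.map (fun kv => kv.1)
  (stp_wrds, most_common_ingred)

-- ===== PRECONDITION & SPEC =====
-- Pre_ excludes association lists with duplicate keys: those do not represent any Python dict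
-- input (a dict literal with a repeated key collapses before A or B ever sees it), and on them
-- the assoc list is ambiguous about which value the dict holds.
def Pre_stopwords_gen (dictionary : List (String × List String)) : Prop :=
  (dictionary.map Prod.fst).Nodup
instance (dictionary : List (String × List String)) : Decidable (Pre_stopwords_gen dictionary) := by unfold Pre_stopwords_gen; infer_instance
def pvWitness_stopwords_gen : (List (String × List String)) := [("a", ["x"])]

-- When every value list of the dict is empty (including the empty dict), A's ','.join over nothing
-- yields '' which splits to [''], so A returns ([''], [('', 1)]) — a phantom empty ingredient;
-- B returns ([], []), the intended 'no ingredients' answer.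
def D_stopwords_gen (dictionary : List (String × List String)) : Prop :=
  dictionary.all (fun p => p.2.isEmpty) = true
instance (dictionary : List (String × List String)) : Decidable (D_stopwords_gen dictionary) := by unfold D_stopwords_gen; infer_instance

def Spec_stopwords_gen (dictionary : List (String × List String)) (out : List String × (List (String × Int))) : Prop := ¬ D_stopwords_gen dictionary → out = stopwords_gen_alt dictionary
instance (dictionary : List (String × List String)) (out : List String × (List (String × Int))) : Decidable (Spec_stopwords_gen dictionary out) := by unfold Spec_stopwords_gen; infer_instance

def pvDiffWitness_stopwords_gen : (List (String × List String)) := []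
def pvDiffWitnessOut_stopwords_gen : (List String × (List (String × Int))) × (List String × (List (String × Int))) :=
  (([""], [("", 1)]), ([], []))

-- ===== CLAIM (what is proved, stated in full; the proofs are below) =====
def Claim_unchanged_stopwords_gen : Prop := ∀ (dictionary : List (String × List String)), Dom_stopwords_gen dictionary → Pre_stopwords_gen dictionary → Spec_stopwords_gen dictionary (stopwords_gen dictionary)
def Claim_changed_stopwords_gen : Prop := Dom_stopwords_gen (pvDiffWitness_stopwords_gen) ∧ Pre_stopwords_gen (pvDiffWitness_stopwords_gen) ∧ D_stopwords_gen (pvDiffWitness_stopwords_gen) ∧ stopwords_gen (pvDiffWitness_stopwords_gen) = pvDiffWitnessOut_stopwords_gen.1 ∧ stopwords_gen_alt (pvDiffWitness_stopwords_gen) = pvDiffWitnessOut_stopwords_gen.2 ∧ pvDiffWitnessOut_stopwords_gen.1 ≠ pvDiffWitnessOut_stopwords_gen.2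
def Claim_exact_stopwords_gen : Prop := ∀ (dictionary : List (String × List String)), Dom_stopwords_gen dictionary → Pre_stopwords_gen dictionary → D_stopwords_gen dictionary → stopwords_gen dictionary ≠ stopwords_gen_alt dictionary

-- ===== LEMMAS AND PROOFS =====

-- with no duplicate keys every insert is fresh, so the dict's items are the assoc list itself
theorem pv_values_of_nodup (d : List (String × List String)) (h : (d.map Prod.fst).Nodup) :
    (PySem.Dict.ofList d).values = d.map Prod.snd := by
  have hitems : (PySem.Dict.ofList d).items = d := by
    have := PySem.Dict.items_foldl_insert_fresh d Prod.fst Prod.snd PySem.Dict.empty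
      (fun a _ => PySem.Dict.contains_empty a.1) h
    simpa using this
  simp only [PySem.Dict.values, hitems]

-- PySem.Chars.splitOn.go on a one-character separator is Mathlib's splitOnP, with accumulators spelled out.
theorem pv_go_spec (c : Char) : ∀ (fuel : Nat) (l cur : List Char) (accs : List (List Char)),
    l.length ≤ fuel →
    PySem.Chars.splitOn.go [c] fuel l cur accs
      = accs.reverse ++ (List.splitOnP (fun x => x == c) l).modifyHead (cur.reverse ++ ·) := by
  intro fuel
  induction fuel with
  | zero => intro l cur accs h
            have : l = [] := List.eq_nil_of_length_eq_zero (Nat.le_zero.mp h)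
            subst this
            simp [PySem.Chars.splitOn.go, List.splitOnP_nil, List.modifyHead]
  | succ n ih =>
    intro l cur accs h
    cases l with
    | nil => simp [PySem.Chars.splitOn.go, List.splitOnP_nil, List.modifyHead]
    | cons x rest =>
      rw [PySem.Chars.splitOn.go]
      by_cases hx : x = c
      · subst hx
        have hpre : List.isPrefixOf [x] (x :: rest) = true := by simp [List.isPrefixOf]
        rw [if_pos hpre]
        simp only [List.length, List.drop_succ_cons, List.drop_zero]
        rw [ih rest [] (cur.reverse :: accs) (by simpa using Nat.le_of_succ_le_succ h)]
        rw [List.splitOnP_cons]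
        simp [List.modifyHead]
        cases hsp : List.splitOnP (fun x_1 => x_1 == x) rest with
        | nil => exact absurd hsp (List.splitOnP_ne_nil _ _)
        | cons a b => simp
      · have hpre : List.isPrefixOf [c] (x :: rest) = false := by
          simp [List.isPrefixOf]; exact fun hh => absurd hh.symm hx
        rw [if_neg (by simp [hpre])]
        rw [ih rest (x :: cur) accs (by simpa using Nat.le_of_succ_le_succ h)]
        rw [List.splitOnP_cons]
        have hxc : (x == c) = false := by simp [hx]
        rw [if_neg (by simp [hxc])]
        cases hsp : List.splitOnP (fun x_1 => x_1 == c) rest with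
        | nil => exact absurd hsp (List.splitOnP_ne_nil _ _)
        | cons a b => simp [List.modifyHead]

theorem pv_splitOn_single (c : Char) (s : List Char) :
    PySem.Chars.splitOn s [c] = List.splitOnP (fun x => x == c) s := by
  rw [PySem.Chars.splitOn, pv_go_spec c (s.length+1) s [] [] (by omega)]
  cases hsp : List.splitOnP (fun x => x == c) s with
  | nil => exact absurd hsp (List.splitOnP_ne_nil _ _)
  | cons a b => simp [List.modifyHead]

-- splitting distributes over concatenation at a separator occurrence
theorem pv_splitOnP_append_sep {α : Type} (p : α → Bool) (x : α) (hx : p x = true) :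
    ∀ (a b : List α), List.splitOnP p (a ++ x :: b) = List.splitOnP p a ++ List.splitOnP p b := by
  intro a
  induction a with
  | nil => intro b; simp [List.splitOnP_cons, hx, List.splitOnP_nil]
  | cons y ys ih =>
    intro b
    simp only [List.cons_append, List.splitOnP_cons, ih b]
    by_cases hy : p y = true
    · simp [hy]
    · simp only [hy, if_neg, Bool.false_eq_true, not_false_iff]
      cases hsp : List.splitOnP p ys with
      | nil => exact absurd hsp (List.splitOnP_ne_nil _ _)
      | cons u v => simp [List.modifyHead]

-- split(sep.join(ps), sep) = concatenation of splits, for nonempty ps and a one-char sep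
theorem pv_splitOn_join (c : Char) : ∀ (ps : List (List Char)), ps ≠ [] →
    PySem.Chars.splitOn (PySem.Chars.join [c] ps) [c] = ps.flatMap (fun s => PySem.Chars.splitOn s [c]) := by
  intro ps
  induction ps with
  | nil => intro h; exact absurd rfl h
  | cons p rest ih =>
    intro _
    cases rest with
    | nil => simp [PySem.Chars.join_singleton]
    | cons q r =>
      rw [PySem.Chars.join_cons_cons, List.flatMap_cons, ← ih (by simp)]
      rw [pv_splitOn_single, pv_splitOn_single, List.append_assoc, List.singleton_append,
          pv_splitOnP_append_sep (fun x => x == c) c (by simp) p _, pv_splitOn_single]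

theorem pv_str_pieces (s : String) :
    (PySem.Str.split? s ",").getD [] = (PySem.Chars.splitOn s.toList [',']).map String.ofList := by
  have hsep : (",".toList : List Char) = [','] := rfl
  simp [PySem.Str.split?, PySem.Chars.split?, hsep]

-- the str-level form: ','.join(flat).split(',') = concatenation of the per-item splits
theorem pv_join_split (flat : List String) (h : flat ≠ []) :
    (PySem.Str.split? (PySem.Str.join "," flat) ",").getD []
      = flat.flatMap (fun s => (PySem.Str.split? s ",").getD []) := by
  rw [pv_str_pieces]
  have hsep : (",".toList : List Char) = [','] := rfl
  rw [PySem.Str.join]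
  rw [String.toList_ofList, hsep]
  rw [pv_splitOn_join ',' (flat.map String.toList) (by simpa using h)]
  rw [List.flatMap_map, List.map_flatMap]
  simp [pv_str_pieces]

-- invariant of Source B's _first_ge loop (stated and proved here because PySem's bisectLeft_spec is
-- Int-only; the loop is Source B's own while-loop, not the bisect primitive)
theorem pv_bsearchGE_spec (ordered : List String) (tok : String)
    (hs : ordered.Pairwise (· ≤ ·)) :
    ∀ (fuel lo hi : Nat), lo ≤ hi → hi ≤ ordered.length → hi - lo ≤ fuel →
    (∀ (j : Nat) (hj : j < ordered.length), j < lo → ordered[j] < tok) →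
    (∀ (j : Nat) (hj : j < ordered.length), hi ≤ j → tok ≤ ordered[j]) →
    lo ≤ pvBsearchGE ordered tok fuel lo hi ∧
    pvBsearchGE ordered tok fuel lo hi ≤ hi ∧
    (∀ (j : Nat) (hj : j < ordered.length), j < pvBsearchGE ordered tok fuel lo hi → ordered[j] < tok) ∧
    (∀ (j : Nat) (hj : j < ordered.length), pvBsearchGE ordered tok fuel lo hi ≤ j → tok ≤ ordered[j]) := by
  intro fuel
  induction fuel with
  | zero =>
    intro lo hi hlohi hhi hfuel hlt hge
    have : lo = hi := by omega
    subst this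
    exact ⟨le_refl _, le_refl _, fun j hj hjlt => hlt j hj hjlt, fun j hj hle => hge j hj hle⟩
  | succ n ih =>
    intro lo hi hlohi hhi hfuel hlt hge
    rw [pvBsearchGE]
    by_cases hcase : lo < hi
    · rw [if_pos hcase]
      have hmidlt : (lo + hi) / 2 < ordered.length := by omega
      have hget : PySem.List.pyGet? ordered (((lo + hi) / 2 : Nat) : Int)
          = some ordered[(lo + hi) / 2] := by
        rw [PySem.List.pyGet?_natCast]
        simp [List.getElem?_eq_getElem hmidlt]
      rw [hget]
      dsimp only
      by_cases hylt : ordered[(lo + hi) / 2] < tok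
      · rw [if_pos hylt]
        have hlt' : ∀ (j : Nat) (hj : j < ordered.length), j < (lo + hi) / 2 + 1 → ordered[j] < tok := by
          intro j hj hjlt
          have : ordered[j] ≤ ordered[(lo + hi) / 2] := by
            rcases Nat.lt_or_ge j ((lo + hi) / 2) with hj2 | hj2
            · exact (List.pairwise_iff_getElem.mp hs) j ((lo + hi) / 2) hj hmidlt hj2
            · have : j = (lo + hi) / 2 := by omega
              subst this; exact le_refl _
          exact lt_of_le_of_lt this hylt
        obtain ⟨h1, h2, h3, h4⟩ := ih ((lo + hi) / 2 + 1) hi (by omega) hhi (by omega) hlt' hge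
        exact ⟨by omega, h2, h3, h4⟩
      · rw [if_neg hylt]
        have hge' : ∀ (j : Nat) (hj : j < ordered.length), (lo + hi) / 2 ≤ j → tok ≤ ordered[j] := by
          intro j hj hle
          have h0 : tok ≤ ordered[(lo + hi) / 2] := le_of_not_gt hylt
          rcases Nat.eq_or_lt_of_le hle with hj3 | hj3
          · subst hj3; exact h0
          · exact le_trans h0 ((List.pairwise_iff_getElem.mp hs) _ j hmidlt hj hj3)
        obtain ⟨h1, h2, h3, h4⟩ := ih lo ((lo + hi) / 2) (by omega) (by omega) (by omega) hlt hge'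
        exact ⟨h1, by omega, h3, h4⟩
    · rw [if_neg hcase]
      have : lo = hi := by omega
      subst this
      exact ⟨le_refl _, le_refl _, fun j hj hjlt => hlt j hj hjlt, fun j hj hle => hge j hj hle⟩

-- invariant of Source B's _first_gt loop
theorem pv_bsearchGT_spec (ordered : List String) (tok : String)
    (hs : ordered.Pairwise (· ≤ ·)) :
    ∀ (fuel lo hi : Nat), lo ≤ hi → hi ≤ ordered.length → hi - lo ≤ fuel →
    (∀ (j : Nat) (hj : j < ordered.length), j < lo → ordered[j] ≤ tok) →
    (∀ (j : Nat) (hj : j < ordered.length), hi ≤ j → tok < ordered[j]) →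
    lo ≤ pvBsearchGT ordered tok fuel lo hi ∧
    pvBsearchGT ordered tok fuel lo hi ≤ hi ∧
    (∀ (j : Nat) (hj : j < ordered.length), j < pvBsearchGT ordered tok fuel lo hi → ordered[j] ≤ tok) ∧
    (∀ (j : Nat) (hj : j < ordered.length), pvBsearchGT ordered tok fuel lo hi ≤ j → tok < ordered[j]) := by
  intro fuel
  induction fuel with
  | zero =>
    intro lo hi hlohi hhi hfuel hlt hge
    have : lo = hi := by omega
    subst this
    exact ⟨le_refl _, le_refl _, fun j hj hjlt => hlt j hj hjlt, fun j hj hle => hge j hj hle⟩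
  | succ n ih =>
    intro lo hi hlohi hhi hfuel hlt hge
    rw [pvBsearchGT]
    by_cases hcase : lo < hi
    · rw [if_pos hcase]
      have hmidlt : (lo + hi) / 2 < ordered.length := by omega
      have hget : PySem.List.pyGet? ordered (((lo + hi) / 2 : Nat) : Int)
          = some ordered[(lo + hi) / 2] := by
        rw [PySem.List.pyGet?_natCast]
        simp [List.getElem?_eq_getElem hmidlt]
      rw [hget]
      dsimp only
      by_cases hyle : ordered[(lo + hi) / 2] ≤ tok
      · rw [if_pos hyle]
        have hlt' : ∀ (j : Nat) (hj : j < ordered.length), j < (lo + hi) / 2 + 1 → ordered[j] ≤ tok := by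
          intro j hj hjlt
          rcases Nat.lt_or_ge j ((lo + hi) / 2) with hj2 | hj2
          · exact le_trans ((List.pairwise_iff_getElem.mp hs) j ((lo + hi) / 2) hj hmidlt hj2) hyle
          · have : j = (lo + hi) / 2 := by omega
            subst this; exact hyle
        obtain ⟨h1, h2, h3, h4⟩ := ih ((lo + hi) / 2 + 1) hi (by omega) hhi (by omega) hlt' hge
        exact ⟨by omega, h2, h3, h4⟩
      · rw [if_neg hyle]
        have hge' : ∀ (j : Nat) (hj : j < ordered.length), (lo + hi) / 2 ≤ j → tok < ordered[j] := by
          intro j hj hle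
          have h0 : tok < ordered[(lo + hi) / 2] := lt_of_not_ge hyle
          rcases Nat.eq_or_lt_of_le hle with hj3 | hj3
          · subst hj3; exact h0
          · exact lt_of_lt_of_le h0 ((List.pairwise_iff_getElem.mp hs) _ j hmidlt hj hj3)
        obtain ⟨h1, h2, h3, h4⟩ := ih lo ((lo + hi) / 2) (by omega) (by omega) (by omega) hlt hge'
        exact ⟨h1, by omega, h3, h4⟩
    · rw [if_neg hcase]
      have : lo = hi := by omega
      subst this
      exact ⟨le_refl _, le_refl _, fun j hj hjlt => hlt j hj hjlt, fun j hj hle => hge j hj hle⟩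

-- on a sorted list the two searches bracket exactly the block of copies of tok
theorem pv_block_count (ordered : List String) (tok : String)
    (hs : ordered.Pairwise (· ≤ ·)) :
    ((pvFirstGT ordered tok : Int) - (pvFirstGE ordered tok : Int)) = (ordered.count tok : Int) := by
  obtain ⟨hA1, hA2, hA3, hA4⟩ := pv_bsearchGE_spec ordered tok hs ordered.length 0 ordered.length
    (Nat.zero_le _) (le_refl _) (by omega) (by omega) (by omega)
  obtain ⟨hB1, hB2, hB3, hB4⟩ := pv_bsearchGT_spec ordered tok hs ordered.length 0 ordered.length
    (Nat.zero_le _) (le_refl _) (by omega) (by omega) (by omega)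
  have hEqA : pvBsearchGE ordered tok ordered.length 0 ordered.length = pvFirstGE ordered tok := rfl
  have hEqB : pvBsearchGT ordered tok ordered.length 0 ordered.length = pvFirstGT ordered tok := rfl
  rw [hEqA] at hA1 hA2 hA3 hA4
  rw [hEqB] at hB1 hB2 hB3 hB4
  set a := pvFirstGE ordered tok with ha
  set b := pvFirstGT ordered tok with hb
  have hab : a ≤ b := by
    by_contra hcon
    rw [not_le] at hcon
    have hblt : b < ordered.length := lt_of_lt_of_le hcon hA2
    exact absurd (hA3 b hblt hcon) (not_lt_of_ge (le_of_lt (hB4 b hblt (le_refl b))))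
  -- the middle block is all tok
  have hmid : (ordered.drop a).take (b - a) = List.replicate (b - a) tok := by
    have hlen : ((ordered.drop a).take (b - a)).length = b - a := by
      simp only [List.length_take, List.length_drop]
      omega
    rw [List.eq_replicate_iff]
    refine ⟨hlen, ?_⟩
    intro y hy
    rw [List.mem_iff_getElem] at hy
    obtain ⟨i, hi, hyi⟩ := hy
    rw [hlen] at hi
    have hidx : a + i < ordered.length := by omega
    have : ((ordered.drop a).take (b - a))[i] = ordered[a + i] := by
      rw [List.getElem_take, List.getElem_drop]
    rw [this] at hyi
    have h1 : tok ≤ ordered[a + i] := hA4 (a + i) hidx (by omega)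
    have h2 : ordered[a + i] ≤ tok := hB3 (a + i) hidx (by omega)
    rw [← hyi]
    exact le_antisymm h2 h1
  have hcnt : ordered.count tok = b - a := by
    conv_lhs => rw [← List.take_append_drop a ordered]
    rw [List.count_append]
    conv_lhs => rw [← List.take_append_drop (b - a) (ordered.drop a)]
    rw [List.count_append, hmid, List.count_replicate_self, List.drop_drop]
    have hba : a + (b - a) = b := by omega
    rw [hba]
    have hpre : (ordered.take a).count tok = 0 := by
      rw [List.count_eq_zero]
      intro hmem
      rw [List.mem_iff_getElem] at hmem
      obtain ⟨i, hi, hyi⟩ := hmem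
      have hia : i < a := lt_of_lt_of_le hi (by simp [List.length_take])
      have hil : i < ordered.length := by
        have := List.length_take_le a ordered
        have : a ≤ ordered.length := hA2
        omega
      rw [List.getElem_take] at hyi
      exact absurd (hyi ▸ hA3 i hil hia) (lt_irrefl tok)
    have hpost : (ordered.drop b).count tok = 0 := by
      rw [List.count_eq_zero]
      intro hmem
      rw [List.mem_iff_getElem] at hmem
      obtain ⟨i, hi, hyi⟩ := hmem
      have hil : b + i < ordered.length := by
        rw [List.length_drop] at hi; omega
      rw [List.getElem_drop] at hyi
      exact absurd (hyi ▸ hB4 (b + i) hil (by omega)) (lt_irrefl tok)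
    rw [hpre, hpost]
    omega
  omega

-- B's per-token binary-search count is the plain count in the unsorted token list
theorem pv_bisect_count (tokens : List String) (tok : String) :
    ((pvFirstGT (PySem.List.sorted tokens (fun x => x) false) tok : Int)
      - (pvFirstGE (PySem.List.sorted tokens (fun x => x) false) tok : Int))
      = (tokens.count tok : Int) := by
  have hs : (PySem.List.sorted tokens (fun x => x) false).Pairwise (· ≤ ·) := by
    simpa using PySem.List.sorted_pairwise tokens (fun x => x)
  rw [pv_block_count _ tok hs]
  have := (PySem.List.sorted_perm tokens (fun x => x) false).count_eq tok
  rw [this]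

theorem stopwords_gen_spec : Claim_unchanged_stopwords_gen := by
  intro dictionary _ hpre hnd
  unfold stopwords_gen stopwords_gen_alt
  simp only []
  set vals := (PySem.Dict.ofList dictionary).values with hvals
  have hlist : vals.foldl (fun acc e => acc ++ [e]) [] = vals := by
    simpa using PySem.List.foldl_append_singleton_eq_map (fun e => e) vals []
  rw [hlist]
  set flat := vals.flatMap (fun i => i) with hflat
  have hne : flat ≠ [] := by
    intro hnil
    apply hnd
    have hv : ∀ v ∈ vals, v = [] := fun v hv => (List.flatMap_eq_nil_iff).mp hnil v hv
    rw [hvals, pv_values_of_nodup dictionary hpre] at hv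
    simp only [D_stopwords_gen, List.all_eq_true]
    intro p hp
    exact List.isEmpty_iff.mpr (hv p.2 (List.mem_map.mpr ⟨p, hp, rfl⟩))
  -- A's token list = concatenation of per-item splits
  rw [pv_join_split flat hne]
  -- B's extend-loops build the same token list
  have htok : vals.foldl
      (fun tk ingred_list => ingred_list.foldl
        (fun tk item => tk ++ ((PySem.Str.split? item ",").getD [])) tk) []
      = flat.flatMap (fun s => (PySem.Str.split? s ",").getD []) := by
    simp only [PySem.List.foldl_append_eq_flatMap]
    rw [hflat, List.flatMap_assoc]
    simp
  rw [htok]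
  set T := flat.flatMap (fun s => (PySem.Str.split? s ",").getD []) with hT
  -- B's dedup + binary-search items are exactly Counter(T).items()
  have hitems : (PySem.List.dedup T).map
      (fun tok => (tok, ((pvFirstGT (PySem.List.sorted T (fun x => x) false) tok : Int)
        - (pvFirstGE (PySem.List.sorted T (fun x => x) false) tok : Int))))
      = (PySem.Dict.counter T).items := by
    rw [PySem.Dict.items_counter, PySem.List.dedup_eq_ofList]
    apply List.map_congr_left
    intro t _
    rw [pv_bisect_count T t]
  rw [hitems]
  -- same ranking; Python's [:10] slice is take 10
  rw [PySem.List.slice_to _ (by norm_num : (0:Int) ≤ 10)]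
  rw [PySem.List.foldl_append_singleton_eq_map (fun t : String × Int => t.1)]
  simp

theorem stopwords_gen_changed : Claim_changed_stopwords_gen := by
  unfold Claim_changed_stopwords_gen; decide

theorem stopwords_gen_tight : Claim_exact_stopwords_gen := by
  intro dictionary _ hpre hD
  have hDv : ∀ v ∈ (PySem.Dict.ofList dictionary).values, v = ([] : List String) := by
    rw [pv_values_of_nodup dictionary hpre]
    intro v hv
    rcases List.mem_map.mp hv with ⟨p, hp, rfl⟩
    exact List.isEmpty_iff.mp (List.all_eq_true.mp hD p hp)
  unfold stopwords_gen stopwords_gen_alt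
  simp only []
  -- B's token list is empty, so B returns ([], [])
  have htok : (PySem.Dict.ofList dictionary).values.foldl
      (fun tk ingred_list => ingred_list.foldl
        (fun tk item => tk ++ ((PySem.Str.split? item ",").getD [])) tk) []
      = ([] : List String) := by
    simp only [PySem.List.foldl_append_eq_flatMap]
    simp only [List.nil_append]
    exact List.flatMap_eq_nil_iff.mpr (fun v hv => by rw [hDv v hv]; rfl)
  rw [htok]
  -- A's first component starts with the phantom '' token; B's is []
  intro hcontra
  have h1 := congrArg Prod.fst hcontra
  revert h1
  have hlist : (PySem.Dict.ofList dictionary).values.foldl (fun acc e => acc ++ [e]) []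
      = (PySem.Dict.ofList dictionary).values := by
    simpa using PySem.List.foldl_append_singleton_eq_map (fun e => e) (PySem.Dict.ofList dictionary).values []
  rw [hlist]
  have hflatA : (PySem.Dict.ofList dictionary).values.flatMap (fun i => i) = ([] : List String) :=
    List.flatMap_eq_nil_iff.mpr hDv
  rw [hflatA]
  decide
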